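-- pv_equiv track=rewrite | github.com/ekMi/rna_design | angov_harmonization.py | get_number_of_clusters
-- ===== SOURCE A (Python) =====
-- def get_number_of_clusters(flags):
--     n_cluster = 0
--     last_true_pos = -1
--     for i, flag in enumerate(flags):
--         if flag:
--             if n_cluster == 0:
--                 n_cluster = 1
--             # if distance from last true pos is > 14, a new cluster is starting
--             elif i - last_true_pos > 14:
--                 n_cluster += 1
--             last_true_pos = i
--     return n_cluster
-- ===== SOURCE B (Python) =====
-- def get_number_of_clusters(flags):
--     # A true flag starts a new cluster exactly when no true flag occurs in the
--     # 14 positions immediately before it; count the cluster starts.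
--     return sum(1 for i, f in enumerate(flags)
--                if f and not any(flags[max(0, i - 14):i]))
-- ===== Notes on version B (the rewrite author's own statement) =====
-- stated objective: alternative
-- what changed: Instead of A's stateful scan carrying a cluster counter and a last-true-position sentinel, B counts cluster starts directly: a true flag starts a cluster iff the 14-position window of flags just before it contains no true flag, so B sums a per-position window test and keeps no cross-iteration state.
import Mathlib
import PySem

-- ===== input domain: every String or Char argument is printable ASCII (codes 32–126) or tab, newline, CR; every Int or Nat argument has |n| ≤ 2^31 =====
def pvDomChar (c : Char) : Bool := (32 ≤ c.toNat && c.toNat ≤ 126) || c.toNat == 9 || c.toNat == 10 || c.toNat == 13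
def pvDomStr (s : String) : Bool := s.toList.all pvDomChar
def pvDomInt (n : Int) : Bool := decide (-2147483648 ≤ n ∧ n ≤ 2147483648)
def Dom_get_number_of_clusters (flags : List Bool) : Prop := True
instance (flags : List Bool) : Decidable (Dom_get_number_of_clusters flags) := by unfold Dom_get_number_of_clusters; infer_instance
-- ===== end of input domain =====

-- B replaces A's stateful scan (cluster counter + last-true-position sentinel) by a
-- stateless count of cluster starts via a 14-position look-back window; objective: alternative.

-- ===== PORT A =====
-- state = (n_cluster, last_true_pos); one pass over enumerate(flags)
def get_number_of_clusters (flags : List Bool) : Int :=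
  ((PySem.List.enumerate flags).foldl
    (fun (st : Int × Int) p =>
      if p.2 then
        (if st.1 = 0 then ((1 : Int), p.1)
         else if p.1 - st.2 > 14 then (st.1 + 1, p.1)
         else (st.1, p.1))
      else st) ((0 : Int), (-1 : Int))).1

-- ===== PORT B =====
-- sum(1 for i, f in enumerate(flags) if f and not any(flags[max(0, i-14):i]))
def get_number_of_clusters_alt (flags : List Bool) : Int :=
  (PySem.List.enumerate flags).foldl
    (fun c p =>
      if p.2 && !((PySem.List.slice flags (some (max 0 (p.1 - 14))) (some p.1)).any id)
      then c + 1 else c) 0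

-- ===== PRECONDITION & SPEC =====
def Spec_get_number_of_clusters (flags : List Bool) (out : Int) : Prop := out = get_number_of_clusters_alt flags
instance (flags : List Bool) (out : Int) : Decidable (Spec_get_number_of_clusters flags out) := by unfold Spec_get_number_of_clusters; infer_instance

-- ===== CLAIM (what is proved, stated in full; the proofs are below) =====
def Claim_equal_get_number_of_clusters : Prop := ∀ (flags : List Bool), Dom_get_number_of_clusters flags → Spec_get_number_of_clusters flags (get_number_of_clusters flags)

-- ===== LEMMAS AND PROOFS =====

-- number of consecutive gaps > 14 in the sequence prev :: ps
def gapCount (prev : Int) : List Int → Int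
  | [] => 0
  | p :: ps => (if p - prev > 14 then 1 else 0) + gapCount p ps

def aStep (st : Int × Int) (p : Int × Bool) : Int × Int :=
  if p.2 then
    (if st.1 = 0 then ((1 : Int), p.1)
     else if p.1 - st.2 > 14 then (st.1 + 1, p.1)
     else (st.1, p.1))
  else st

def posOf (l : List (Int × Bool)) : List Int :=
  l.filterMap (fun p => if p.2 then some p.1 else none)

-- B's per-position window test
def winB (flags : List Bool) (i : Int) : Bool :=
  !((PySem.List.slice flags (some (max 0 (i - 14))) (some i)).any id)

-- ---- A-side characterisation: A = 0 / 1 + gapCount over the true positions ----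

lemma afold_pos (l : List (Int × Bool)) :
    ∀ (n last : Int), 1 ≤ n →
      (l.foldl aStep (n, last)).1 = n + gapCount last (posOf l) := by
  induction l with
  | nil => intro n last _; simp [posOf, gapCount]
  | cons p rest ih =>
      intro n last hn
      have hnz : ¬ n = 0 := by omega
      rcases p with ⟨i, f⟩
      cases f with
      | false => simpa [aStep, posOf, List.filterMap_cons] using ih n last hn
      | true =>
          simp only [List.foldl_cons, aStep, if_true, if_neg hnz]
          by_cases h : i - last > 14
          · rw [if_pos h, ih (n + 1) i (by omega)]
            simp [posOf, gapCount, h]; ring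
          · rw [if_neg h, ih n i hn]
            simp [posOf, gapCount, h]

lemma afold_zero (l : List (Int × Bool)) :
    ∀ (last : Int),
      (l.foldl aStep (0, last)).1
        = (match posOf l with
           | [] => (0 : Int)
           | p :: ps => 1 + gapCount p ps) := by
  induction l with
  | nil => intro last; simp [posOf]
  | cons q rest ih =>
      intro last
      rcases q with ⟨i, f⟩
      cases f with
      | false => simpa [aStep, posOf, List.filterMap_cons] using ih last
      | true =>
          simp only [List.foldl_cons, aStep, if_true]
          rw [afold_pos rest 1 i (le_refl 1)]
          simp [posOf]

-- ---- B-side: the fold counts, and the count filters down to the true positions ----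

lemma bfold_count (q : Int → Bool) (l : List (Int × Bool)) :
    ∀ (c : Int),
      l.foldl (fun c p => if p.2 && q p.1 then c + 1 else c) c
        = c + ((posOf l).countP q : Int) := by
  induction l with
  | nil => intro c; simp [posOf]
  | cons p rest ih =>
      intro c
      rcases p with ⟨i, f⟩
      cases f with
      | false => simpa [posOf, List.filterMap_cons] using ih c
      | true =>
          by_cases h : q i = true
          · simp only [List.foldl_cons, h, Bool.and_true, if_true,
              posOf, List.filterMap_cons]
            rw [ih]
            simp [posOf, h]
            ring
          · simp only [List.foldl_cons]
            rw [if_neg (by simp [h]), ih]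
            simp [posOf, h]

-- ---- membership / window facts ----

lemma mem_posOf_enumerate (flags : List Bool) (x : Int) :
    x ∈ posOf (PySem.List.enumerate flags)
      ↔ ∃ (k : Nat), k < flags.length ∧ x = (k : Int) ∧ flags[k]! = true := by
  unfold posOf
  rw [List.mem_filterMap]
  constructor
  · rintro ⟨p, hp, hf⟩
    rw [PySem.List.mem_enumerate_iff] at hp
    obtain ⟨k, hk, rfl⟩ := hp
    by_cases h : flags[k] = true
    · exact ⟨k, hk, by simp at hf; omega, by simp [List.getElem!_eq_getElem?_getD, List.getElem?_eq_getElem hk, h]⟩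
    · simp [Bool.eq_false_iff.mpr h] at hf
  · rintro ⟨k, hk, rfl, hv⟩
    refine ⟨((k : Int), flags[k]), ?_, ?_⟩
    · rw [PySem.List.mem_enumerate_iff]; exact ⟨k, hk, by simp⟩
    · have : flags[k] = true := by
        rwa [List.getElem!_eq_getElem?_getD, List.getElem?_eq_getElem hk] at hv
      simp [this]

lemma pairwise_posOf (flags : List Bool) :
    (posOf (PySem.List.enumerate flags)).Pairwise (· < ·) := by
  unfold posOf
  apply List.Pairwise.filterMap
    (R := fun (p q : Int × Bool) => p.1 < q.1)
  · intro a b ha hb hab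
    rcases a with ⟨i, f⟩; rcases b with ⟨j, g⟩
    cases f <;> cases g <;> simp_all
  · exact PySem.List.pairwise_lt_enumerate flags 0

-- the window is nonempty ⟺ some true flag sits in [i-14, i)
lemma win_spec (flags : List Bool) (i : Int) (h0 : 0 ≤ i) (hl : i ≤ flags.length) :
    winB flags i = false
      ↔ ∃ (j : Nat), i - 14 ≤ (j : Int) ∧ (j : Int) < i ∧ flags[j]! = true := by
  unfold winB
  have ha : (0 : Int) ≤ max 0 (i - 14) := le_max_left _ _
  rw [PySem.List.slice_toNat flags ha h0]
  rw [Bool.not_eq_false']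
  rw [List.any_eq_true]
  constructor
  · rintro ⟨b, hb, hid⟩
    simp only [id] at hid; subst hid
    rw [List.mem_iff_getElem?] at hb
    obtain ⟨k, hk⟩ := hb
    rw [List.getElem?_take] at hk
    split at hk
    · rw [List.getElem?_drop] at hk
      rename_i hkn
      refine ⟨(max 0 (i - 14)).toNat + k, ?_, ?_, ?_⟩
      · push_cast
        omega
      · push_cast
        omega
      · simp [List.getElem!_eq_getElem?_getD, hk]
    · exact absurd hk (by simp)
  · rintro ⟨j, hge, hlt, hv⟩
    refine ⟨true, ?_, rfl⟩
    have hjlen : j < flags.length := by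
      have : (j : Int) < (flags.length : Int) := lt_of_lt_of_le hlt hl
      exact_mod_cast this
    have hja : (max 0 (i - 14)).toNat ≤ j := by omega
    rw [List.mem_iff_getElem?]
    refine ⟨j - (max 0 (i - 14)).toNat, ?_⟩
    rw [List.getElem?_take]
    rw [if_pos (by omega)]
    rw [List.getElem?_drop]
    have : (max 0 (i - 14)).toNat + (j - (max 0 (i - 14)).toNat) = j := by omega
    rw [this, List.getElem?_eq_getElem hjlen]
    rw [List.getElem!_eq_getElem?_getD, List.getElem?_eq_getElem hjlen] at hv
    simp at hv
    simp [hv]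

-- every true position is 0 ≤ · ≤ len and its window test sees exactly the earlier true positions
lemma win_on_pos (flags : List Bool) (i : Int)
    (hi : i ∈ posOf (PySem.List.enumerate flags)) :
    winB flags i = false
      ↔ ∃ j ∈ posOf (PySem.List.enumerate flags), i - 14 ≤ j ∧ j < i := by
  obtain ⟨k, hk, rfl, _⟩ := (mem_posOf_enumerate flags i).mp hi
  rw [win_spec flags k (by positivity) (by exact_mod_cast Nat.le_of_lt hk)]
  constructor
  · rintro ⟨j, h1, h2, h3⟩
    have hjlen : j < flags.length := by
      have hjk : j < k := by exact_mod_cast h2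
      omega
    exact ⟨(j : Int), (mem_posOf_enumerate flags _).mpr ⟨j, hjlen, rfl, h3⟩, h1, h2⟩
  · rintro ⟨j, hj, h1, h2⟩
    obtain ⟨m, hm, rfl, hv⟩ := (mem_posOf_enumerate flags j).mp hj
    exact ⟨m, h1, h2, hv⟩

-- counting window-empty positions along a strictly increasing decomposition = 1 + gapCount
lemma countP_gap (flags : List Bool) :
    ∀ (rest : List Int) (pre : List Int) (prev : Int),
      posOf (PySem.List.enumerate flags) = pre ++ prev :: rest →
      ((rest.countP (winB flags)) : Int) = gapCount prev rest := by
  intro rest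
  induction rest with
  | nil => intro pre prev _; simp [gapCount]
  | cons c rest' ih =>
      intro pre prev hP
      have hpw := pairwise_posOf flags
      rw [hP, List.pairwise_append] at hpw
      obtain ⟨_, hcons, hcross⟩ := hpw
      have hc : c ∈ posOf (PySem.List.enumerate flags) := by
        rw [hP]; simp
      have hprevc : prev < c := (List.pairwise_cons.mp hcons).1 c (by simp)
      have hwin : winB flags c = decide (c - prev > 14) := by
        by_cases hgap : c - prev > 14
        · -- all true positions < c are ≤ prev < c - 14, so the window is empty
          rw [decide_eq_true hgap]
          cases h : winB flags c
          · exfalso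
            obtain ⟨j, hj, h1, h2⟩ := (win_on_pos flags c hc).mp h
            rw [hP] at hj
            rcases List.mem_append.mp hj with hj1 | hj2
            · have : j < prev := hcross j hj1 prev (by simp)
              omega
            · rcases hj2 with _ | ⟨_, hj3⟩
              · omega
              · rcases hj3 with _ | ⟨_, hj4⟩
                · omega
                · have : c < j :=
                    (List.pairwise_cons.mp (List.pairwise_cons.mp hcons).2).1 j hj4
                  omega
          · rfl
        · -- prev is a true position inside the window
          rw [decide_eq_false hgap]
          have hprev : prev ∈ posOf (PySem.List.enumerate flags) := by
            rw [hP]; simp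
          exact (win_on_pos flags c hc).mpr ⟨prev, hprev, by omega, hprevc⟩
      have hrec := ih (pre ++ [prev]) c (by rw [hP]; simp)
      rw [List.countP_cons, hwin, gapCount, ← hrec]
      by_cases hgap : c - prev > 14
      · rw [if_pos hgap, decide_eq_true hgap]
        simp
        ring
      · rw [if_neg hgap, decide_eq_false hgap]
        simp

-- head of the true-position list always passes the window test
lemma win_head (flags : List Bool) (p : Int) (ps : List Int)
    (hP : posOf (PySem.List.enumerate flags) = p :: ps) :
    winB flags p = true := by
  have hp : p ∈ posOf (PySem.List.enumerate flags) := by rw [hP]; simp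
  cases h : winB flags p
  · exfalso
    obtain ⟨j, hj, _, hlt⟩ := (win_on_pos flags p hp).mp h
    have hpw := pairwise_posOf flags
    rw [hP] at hpw
    rw [hP] at hj
    rcases hj with _ | ⟨_, hj2⟩
    · omega
    · have : p < j := (List.pairwise_cons.mp hpw).1 j hj2
      omega
  · rfl

-- ===== VERDICT (by name: the statement is the Claim_ definition above) =====
theorem get_number_of_clusters_spec : Claim_equal_get_number_of_clusters := by
  intro flags _
  unfold Spec_get_number_of_clusters get_number_of_clusters get_number_of_clusters_alt
  have hAstep : (fun (st : Int × Int) p =>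
      if p.2 then
        (if st.1 = 0 then ((1 : Int), p.1)
         else if p.1 - st.2 > 14 then (st.1 + 1, p.1)
         else (st.1, p.1))
      else st) = aStep := by
    funext st p; simp [aStep]
  have hBstep : (fun (c : Int) (p : Int × Bool) =>
      if p.2 && !((PySem.List.slice flags (some (max 0 (p.1 - 14))) (some p.1)).any id)
      then c + 1 else c)
      = (fun c p => if p.2 && winB flags p.1 then c + 1 else c) := by
    funext c p; simp [winB]
  rw [hAstep, hBstep, afold_zero (PySem.List.enumerate flags) (-1),
      bfold_count (winB flags) (PySem.List.enumerate flags) 0]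
  cases hps : posOf (PySem.List.enumerate flags) with
  | nil => simp
  | cons p ps =>
      have h2 := countP_gap flags ps [] p hps
      rw [List.countP_cons, win_head flags p ps hps]
      simp
      rw [← h2]
      ring
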